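-- pv_equiv track=rewrite | github.com/ds-sec162/xssforge | xssforge/waf/evasion.py | hex_escape
-- ===== SOURCE A (Python) =====
-- def hex_escape(payload: str) -> str:
--     """Replace key characters with hex escapes."""
--     replacements = {
--         'a': '\\x61',
--         'e': '\\x65',
--         'l': '\\x6c',
--         'r': '\\x72',
--         't': '\\x74',
--     }
--     result = payload
--     for orig, repl in replacements.items():
--         result = result.replace(orig, repl)
--     return result
-- ===== SOURCE B (Python) =====
-- def hex_escape(payload: str) -> str:
--     """Replace key characters with hex escapes, computing each escape from ord()."""
--     return ''.join(
--         '\\x%02x' % ord(c) if c in 'aelrt' else c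
--         for c in payload
--     )
-- ===== Notes on version B (the rewrite author's own statement) =====
-- stated objective: simpler
-- what changed: Drops the replacement dict and the five sequential full-string str.replace scans: B makes one left-to-right pass and, for each of the five target letters, computes its escape directly as '\x%02x' % ord(c); exactness holds because no emitted escape contains a target letter.
import Mathlib
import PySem

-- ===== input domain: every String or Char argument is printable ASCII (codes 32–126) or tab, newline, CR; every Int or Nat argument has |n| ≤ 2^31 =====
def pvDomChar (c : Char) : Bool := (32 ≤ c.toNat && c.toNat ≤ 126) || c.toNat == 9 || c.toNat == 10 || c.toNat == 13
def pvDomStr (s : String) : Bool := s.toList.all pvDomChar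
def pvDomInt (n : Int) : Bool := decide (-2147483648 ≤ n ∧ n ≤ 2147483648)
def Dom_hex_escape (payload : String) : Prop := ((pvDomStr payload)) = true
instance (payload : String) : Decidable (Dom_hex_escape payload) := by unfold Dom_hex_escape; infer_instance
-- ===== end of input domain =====

-- B drops the replacement dict and A's five sequential full-string str.replace scans:
-- one pass computing each escape directly from the character code (objective: simpler).

-- ===== PORT A =====
def hex_escape (payload : String) : String :=
  let replacements : PySem.Dict String String :=
    (((((PySem.Dict.empty.insert "a" "\\x61").insert "e" "\\x65").insert "l" "\\x6c").insert
        "r" "\\x72").insert "t" "\\x74")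
  let result := replacements.items.foldl (fun result p => PySem.Str.replace result p.1 p.2) payload
  result

-- ===== PORT B =====
/-- one lowercase hex digit, as in Python's '%x' formatting -/
def pvHexDigit (n : Nat) : Char := if n < 10 then Char.ofNat (48 + n) else Char.ofNat (87 + n)

/-- '\\x%02x' % ord(c): exact for ord(c) < 256, which holds on the ASCII domain -/
def pvEscape (c : Char) : List Char :=
  ['\\', 'x', pvHexDigit (c.toNat / 16), pvHexDigit (c.toNat % 16)]

def hex_escape_alt (payload : String) : String :=
  PySem.Str.join "" (payload.toList.map
    (fun c => if c ∈ "aelrt".toList then String.ofList (pvEscape c) else String.ofList [c]))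

-- ===== PRECONDITION & SPEC =====
def Spec_hex_escape (payload : String) (out : String) : Prop := out = hex_escape_alt payload
instance (payload : String) (out : String) : Decidable (Spec_hex_escape payload out) := by unfold Spec_hex_escape; infer_instance

-- ===== CLAIM (what is proved, stated in full; the proofs are below) =====
def Claim_equal_hex_escape : Prop := ∀ (payload : String), Dom_hex_escape payload → Spec_hex_escape payload (hex_escape payload)

-- ===== LEMMAS AND PROOFS =====

/-- Replacing a single-character pattern is a character-wise flatMap. -/
theorem replace_go_single (a : Char) (new : List Char) :
    ∀ (l : List Char) (fuel : Nat) (acc : List Char), l.length ≤ fuel →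
      PySem.Chars.replace.go [a] new fuel l acc =
        acc.reverse ++ l.flatMap (fun c => if c = a then new else [c]) := by
  intro l
  induction l with
  | nil =>
      intro fuel acc _
      cases fuel <;> simp [PySem.Chars.replace.go]
  | cons c t ih =>
      intro fuel acc hf
      cases fuel with
      | zero => simp at hf
      | succ n =>
          have hf' : t.length ≤ n := by simp [List.length_cons] at hf; omega
          by_cases hc : c = a
          · subst hc
            have hpre : ([c].isPrefixOf (c :: t)) = true := by simp [List.isPrefixOf]
            simp only [PySem.Chars.replace.go, hpre, if_true, List.length_singleton,
              List.drop_succ_cons, List.drop_zero]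
            rw [ih n (new.reverse ++ acc) hf']
            simp
          · have hpre : ([a].isPrefixOf (c :: t)) = false := by
              simp [List.isPrefixOf, Ne.symm hc]
            simp only [PySem.Chars.replace.go, hpre, Bool.false_eq_true, if_false]
            rw [ih n (c :: acc) hf']
            simp [hc]

theorem replace_single (a : Char) (new l : List Char) :
    PySem.Chars.replace l [a] new = l.flatMap (fun c => if c = a then new else [c]) := by
  rw [PySem.Chars.replace]
  simp only [List.isEmpty_cons, Bool.false_eq_true, if_false]
  simpa using replace_go_single a new l l.length [] le_rfl

theorem join_empty_sep (xs : List (List Char)) :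
    PySem.Chars.join [] xs = xs.flatten := by
  rw [PySem.Chars.join, List.intercalate]
  induction xs with
  | nil => simp
  | cons x t ih =>
      cases t with
      | nil => simp
      | cons y u => simpa using ih

/-- The common per-character substitution both programs realise. -/
def bsub (c : Char) : List Char :=
  if c = 'a' then "\\x61".toList else if c = 'e' then "\\x65".toList
  else if c = 'l' then "\\x6c".toList else if c = 'r' then "\\x72".toList
  else if c = 't' then "\\x74".toList else [c]

theorem B_toList (payload : String) :
    (hex_escape_alt payload).toList = payload.toList.flatMap bsub := by
  rw [hex_escape_alt]
  rw [PySem.Str.toList_join]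
  show PySem.Chars.join "".toList _ = _
  rw [show ("".toList : List Char) = [] from rfl, join_empty_sep, List.map_map,
    List.flatten_eq_flatMap, List.flatMap_map]
  apply List.flatMap_congr
  intro c _
  by_cases h1 : c = 'a'
  · subst h1; decide
  all_goals by_cases h2 : c = 'e'
  case pos => subst h2; decide
  all_goals by_cases h3 : c = 'l'
  case pos => subst h3; decide
  all_goals by_cases h4 : c = 'r'
  case pos => subst h4; decide
  all_goals by_cases h5 : c = 't'
  case pos => subst h5; decide
  · simp [bsub, h1, h2, h3, h4, h5,
      show ("aelrt".toList : List Char) = ['a','e','l','r','t'] from rfl]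

theorem A_toList (payload : String) :
    (hex_escape payload).toList = payload.toList.flatMap bsub := by
  rw [hex_escape]
  show (PySem.Str.replace (PySem.Str.replace (PySem.Str.replace (PySem.Str.replace
      (PySem.Str.replace payload "a" "\\x61") "e" "\\x65") "l" "\\x6c") "r" "\\x72")
      "t" "\\x74").toList = _
  simp only [PySem.Str.toList_replace]
  rw [show ("a".toList : List Char) = ['a'] from rfl,
      show ("e".toList : List Char) = ['e'] from rfl,
      show ("l".toList : List Char) = ['l'] from rfl,
      show ("r".toList : List Char) = ['r'] from rfl,
      show ("t".toList : List Char) = ['t'] from rfl]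
  rw [replace_single, replace_single, replace_single, replace_single, replace_single]
  rw [List.flatMap_assoc, List.flatMap_assoc, List.flatMap_assoc, List.flatMap_assoc]
  apply List.flatMap_congr
  intro c _
  by_cases h1 : c = 'a'
  · subst h1; decide
  all_goals by_cases h2 : c = 'e'
  case pos => subst h2; decide
  all_goals by_cases h3 : c = 'l'
  case pos => subst h3; decide
  all_goals by_cases h4 : c = 'r'
  case pos => subst h4; decide
  all_goals by_cases h5 : c = 't'
  case pos => subst h5; decide
  · simp [bsub, h1, h2, h3, h4, h5]

-- ===== VERDICT (by name: the statement is the Claim_ definition above) =====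
theorem hex_escape_spec : Claim_equal_hex_escape := by
  intro payload _
  show hex_escape payload = hex_escape_alt payload
  have := (A_toList payload).trans (B_toList payload).symm
  exact String.ext this
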